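-- pv_equiv track=rewrite | github.com/varnerlab/Reduced_EMT_Model | Results/df_parser.py | parse_DataFile
-- ===== SOURCE A (Python) =====
-- def parse_DataFile(linlist):
--     species = []
--     for LINE in linlist:
--         if '\t#\t' in LINE:
--             i=LINE.index('\t#\t')
--             species.append( LINE[i:].split('\t')[2:] ) # take from i till end and produce a list
--
--         if 'time constant array' in LINE:
--             break
--     return species
-- ===== SOURCE B (Python) =====
-- def parse_DataFile(linlist):
--     j = next((i for i, L in enumerate(linlist) if 'time constant array' in L),
--              len(linlist) - 1)
--     return [L[L.index('\t#\t'):].split('\t')[2:]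
--             for L in linlist[:j + 1] if '\t#\t' in L]
-- ===== Notes on version B (the rewrite author's own statement) =====
-- stated objective: simpler
-- what changed: Replaces the single break-scan with a two-pass decomposition: first locate the cutoff line index (first line containing 'time constant array', defaulting to the whole list), then build the result with one filtered comprehension over the inclusive prefix.
import Mathlib
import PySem

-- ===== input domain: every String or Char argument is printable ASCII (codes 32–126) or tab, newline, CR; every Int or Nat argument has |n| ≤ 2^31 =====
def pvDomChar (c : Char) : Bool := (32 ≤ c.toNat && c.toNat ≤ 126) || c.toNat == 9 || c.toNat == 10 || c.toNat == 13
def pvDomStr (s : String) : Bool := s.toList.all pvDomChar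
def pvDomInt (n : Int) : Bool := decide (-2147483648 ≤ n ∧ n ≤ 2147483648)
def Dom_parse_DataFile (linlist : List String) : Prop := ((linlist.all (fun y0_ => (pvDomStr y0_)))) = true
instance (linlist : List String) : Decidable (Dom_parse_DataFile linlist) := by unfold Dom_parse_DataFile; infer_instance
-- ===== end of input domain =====

-- B computes the cutoff index first, then builds the result with one filtered map over the inclusive prefix (simpler decomposition; equivalent).


-- ===== PORT A =====
-- LINE[i:].split('\t')[2:] with i = LINE.index('\t#\t'); inside the guard index = find,
-- and split? with the nonempty separator "\t" is always some (getD [] is never taken).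
def pvEntry (L : String) : List String :=
  PySem.List.slice ((PySem.Str.split? (PySem.Str.slice L (some (PySem.Str.find L "\t#\t")) none) "\t").getD []) (some 2) none

def parseGoA : List String → List (List String) → List (List String)
  | [], species => species
  | L :: rest, species =>
    let species' := if PySem.Str.isIn "\t#\t" L then species ++ [pvEntry L] else species
    if PySem.Str.isIn "time constant array" L then species' else parseGoA rest species'

def parse_DataFile (linlist : List String) : List (List String) :=
  parseGoA linlist []

-- ===== PORT B =====
-- next((i for i, L in enumerate(linlist) if 'time constant array' in L), len(linlist) - 1)
def pvFindMarker : List String → Nat → Option Nat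
  | [], _ => none
  | L :: rest, i =>
    if PySem.Str.isIn "time constant array" L then some i else pvFindMarker rest (i + 1)

def parse_DataFile_alt (linlist : List String) : List (List String) :=
  let j := (pvFindMarker linlist 0).getD (linlist.length - 1)
  ((linlist.take (j + 1)).filter (fun L => PySem.Str.isIn "\t#\t" L)).map pvEntry

-- ===== PRECONDITION & SPEC =====
def Spec_parse_DataFile (linlist : List String) (out : List (List String)) : Prop := out = parse_DataFile_alt linlist
instance (linlist : List String) (out : List (List String)) : Decidable (Spec_parse_DataFile linlist out) := by unfold Spec_parse_DataFile; infer_instance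

-- ===== CLAIM =====
def Claim_equal_parse_DataFile : Prop := ∀ (linlist : List String), Dom_parse_DataFile linlist → Spec_parse_DataFile linlist (parse_DataFile linlist)

-- ===== LEMMAS AND PROOFS =====
-- common reference shape: emit per line, stop after a marker line (inclusive)
def pvSpec : List String → List (List String)
  | [] => []
  | L :: rest =>
    (if PySem.Str.isIn "\t#\t" L then [pvEntry L] else []) ++
    (if PySem.Str.isIn "time constant array" L then [] else pvSpec rest)

theorem parseGoA_eq (l : List String) : ∀ acc, parseGoA l acc = acc ++ pvSpec l := by
  induction l with
  | nil => intro acc; simp [parseGoA, pvSpec]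
  | cons L rest ih =>
    intro acc
    simp only [parseGoA, pvSpec]
    cases hm : PySem.Str.isIn "time constant array" L <;>
      cases hh : PySem.Str.isIn "\t#\t" L <;>
      simp only [if_true, Bool.false_eq_true, if_false, ih] <;> simp

theorem pvFindMarker_one (l : List String) : pvFindMarker l 1 = (pvFindMarker l 0).map (· + 1) := by
  have key : ∀ (l : List String) (i : Nat), pvFindMarker l (i + 1) = (pvFindMarker l i).map (· + 1) := by
    intro l
    induction l with
    | nil => intro i; simp [pvFindMarker]
    | cons L rest ih =>
      intro i
      cases hm : PySem.Str.isIn "time constant array" L <;>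
        simp only [pvFindMarker, hm, Bool.false_eq_true, if_false, if_true, ih] <;> simp
  exact key l 0

theorem alt_eq_pvSpec (l : List String) : parse_DataFile_alt l = pvSpec l := by
  induction l with
  | nil => simp [parse_DataFile_alt, pvSpec, pvFindMarker]
  | cons L rest ih =>
    simp only [parse_DataFile_alt, pvSpec, pvFindMarker]
    cases hm : PySem.Str.isIn "time constant array" L with
    | true =>
      simp only [if_true, Option.getD_some, Nat.zero_add, List.take_succ_cons, List.take_zero,
        List.filter_cons, List.filter_nil]
      cases hh : PySem.Str.isIn "\t#\t" L <;> simp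
    | false =>
      simp only [Bool.false_eq_true, if_false, Nat.zero_add]
      rw [pvFindMarker_one, ← ih]
      cases hf : pvFindMarker rest 0 with
      | some k =>
        simp only [hf, Option.map_some, Option.getD_some, List.take_succ_cons, List.filter_cons]
        cases hh : PySem.Str.isIn "\t#\t" L <;>
          simp only [Bool.false_eq_true, if_false, if_true, List.map_cons] <;>
          simp [parse_DataFile_alt, hf]
      | none =>
        simp only [hf, Option.map_none, Option.getD_none, List.length_cons, Nat.add_sub_cancel]
        have htake : (L :: rest).take (rest.length + 1) = L :: rest := by
          apply List.take_of_length_le; simp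
        have htake2 : rest.take (rest.length - 1 + 1) = rest := by
          apply List.take_of_length_le; omega
        rw [htake]
        simp only [List.filter_cons]
        cases hh : PySem.Str.isIn "\t#\t" L <;>
          simp only [hh, Bool.false_eq_true, if_false, if_true, List.map_cons] <;>
          simp [parse_DataFile_alt, hf, htake2]

-- ===== VERDICT =====
theorem parse_DataFile_spec : Claim_equal_parse_DataFile := by
  intro linlist _
  unfold Spec_parse_DataFile parse_DataFile
  rw [alt_eq_pvSpec, parseGoA_eq]
  simp
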